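-- pv_equiv track=rewrite | github.com/innewiadro/Codewars | kata_level6/Word_a10n_(abbreviation)/Word_a10n_(abbreviation).py | abbreviate
-- ===== SOURCE A (Python) =====
-- def abbreviate(s):
--     word = ''
--     sentance = []
--     abbreviation = []
--     for i in s:
--         if i.isalpha():
--             word = word + i
--         else:
--             sentance.append(word)
--             sentance.append(i)
--             word = ''
--     sentance.append(word)
--
--     for word in sentance:
--         length = len(word)
--         if length > 3:
--             a10n = word[0] + str(length - 2) + word[length - 1]
--             abbreviation.append(a10n)
--
--         else:
--             abbreviation.append(word)
--
--     return ''.join(abbreviation)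
-- ===== SOURCE B (Python) =====
-- from itertools import groupby
--
-- def abbreviate(s):
--     out = []
--     for is_alpha, grp in groupby(s, key=str.isalpha):
--         chunk = ''.join(grp)
--         if is_alpha and len(chunk) > 3:
--             out.append(chunk[0] + str(len(chunk) - 2) + chunk[-1])
--         else:
--             out.append(chunk)
--     return ''.join(out)
-- ===== Notes on version B (the rewrite author's own statement) =====
-- stated objective: idiomatic
-- what changed: Replaces the char-by-char accumulator state machine plus a second abbreviation pass over a mixed list with a single itertools.groupby pass over maximal alpha/non-alpha runs, abbreviating each alpha run in place.
import Mathlib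
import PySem

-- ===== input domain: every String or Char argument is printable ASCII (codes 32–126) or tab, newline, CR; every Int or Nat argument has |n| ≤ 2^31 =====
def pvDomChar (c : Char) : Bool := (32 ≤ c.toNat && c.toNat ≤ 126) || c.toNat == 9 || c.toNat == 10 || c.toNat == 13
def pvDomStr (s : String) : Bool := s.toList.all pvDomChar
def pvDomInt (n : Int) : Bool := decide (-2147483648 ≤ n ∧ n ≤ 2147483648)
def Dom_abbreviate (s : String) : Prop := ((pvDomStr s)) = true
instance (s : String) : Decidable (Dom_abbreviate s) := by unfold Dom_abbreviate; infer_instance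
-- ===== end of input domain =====

-- B replaces A's char-by-char accumulator state machine (plus second abbreviation pass)
-- with one groupby-style pass over maximal alpha/non-alpha runs; same cost, more idiomatic.


-- ===== PORT A =====
-- first loop of A: build the 'sentance' list (words, single non-alpha chars, trailing word)
def pvSentA (cs : List Char) (w : List Char) : List (List Char) :=
  match cs with
  | [] => [w]
  | c :: rest =>
    if PySem.Chars.isalpha c then pvSentA rest (w ++ [c])
    else w :: [c] :: pvSentA rest []

-- second loop of A: word[0] + str(length-2) + word[length-1] when length > 3
def pvAbWord (w : List Char) : List Char :=
  if w.length > 3 then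
    w.head! :: (PySem.Int.toStr ((w.length : Int) - 2)).toList ++ [w.getLast!]
  else w

def abbreviate (s : String) : String :=
  String.ofList (((pvSentA s.toList []).map pvAbWord).flatten)

-- ===== PORT B =====
-- itertools.groupby(s, key=str.isalpha): maximal runs with their key
def pvGroups (cs : List Char) : List (Bool × List Char) :=
  match cs with
  | [] => []
  | c :: rest =>
    let k := PySem.Chars.isalpha c
    (k, c :: rest.takeWhile (fun d => PySem.Chars.isalpha d == k)) ::
      pvGroups (rest.dropWhile (fun d => PySem.Chars.isalpha d == k))
termination_by cs.length
decreasing_by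
  exact Nat.lt_succ_of_le (List.length_dropWhile_le _ _)

-- loop body of B: abbreviate a chunk when is_alpha and len(chunk) > 3
def pvPiece (p : Bool × List Char) : List Char :=
  if p.1 && decide (p.2.length > 3) then
    p.2.head! :: (PySem.Int.toStr ((p.2.length : Int) - 2)).toList ++ [p.2.getLast!]
  else p.2

def abbreviate_alt (s : String) : String :=
  String.ofList (((pvGroups s.toList).map pvPiece).flatten)

-- ===== PRECONDITION & SPEC =====
def Spec_abbreviate (s : String) (out : String) : Prop := out = abbreviate_alt s
instance (s : String) (out : String) : Decidable (Spec_abbreviate s out) := by unfold Spec_abbreviate; infer_instance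

-- ===== CLAIM (what is proved, stated in full; the proofs are below) =====
def Claim_equal_abbreviate : Prop := ∀ (s : String), Dom_abbreviate s → Spec_abbreviate s (abbreviate s)

-- ===== LEMMAS AND PROOFS =====

theorem pvPiece_true (g : List Char) : pvPiece (true, g) = pvAbWord g := by
  by_cases h : g.length > 3 <;> simp [pvPiece, pvAbWord, h]

theorem pvPiece_false (g : List Char) : pvPiece (false, g) = g := by
  simp [pvPiece]

theorem pvAbWord_nil : pvAbWord [] = [] := by simp [pvAbWord]

-- peeling one leading alpha run off the groups-join
theorem pvP (cs : List Char) :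
    pvAbWord (cs.takeWhile PySem.Chars.isalpha) ++
      ((pvGroups (cs.dropWhile PySem.Chars.isalpha)).map pvPiece).flatten
    = ((pvGroups cs).map pvPiece).flatten := by
  match cs with
  | [] => simp [pvGroups, pvAbWord_nil]
  | c :: t =>
    by_cases hc : PySem.Chars.isalpha c = true
    · rw [pvGroups]
      simp [hc, pvPiece_true]
    · rw [List.takeWhile_cons, List.dropWhile_cons]
      simp [hc, pvAbWord_nil]

-- prepending a non-alpha char to the groups-join
theorem pvN (c : Char) (hc : PySem.Chars.isalpha c = false) (rest : List Char) :
    ((pvGroups (c :: rest)).map pvPiece).flatten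
    = c :: ((pvGroups rest).map pvPiece).flatten := by
  rw [pvGroups]
  simp only [hc]
  match rest with
  | [] => simp [pvGroups, pvPiece_false]
  | d :: t =>
    by_cases hd : PySem.Chars.isalpha d = true
    · simp [hd, pvPiece_false, pvGroups]
    · have hd' : PySem.Chars.isalpha d = false := by simpa using hd
      rw [pvGroups]
      simp [hd', pvPiece_false]

-- main invariant: A's state machine with pending word w equals B's group decomposition
theorem pvL (cs : List Char) : ∀ (w : List Char),
    ((pvSentA cs w).map pvAbWord).flatten
    = pvAbWord (w ++ cs.takeWhile PySem.Chars.isalpha) ++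
        ((pvGroups (cs.dropWhile PySem.Chars.isalpha)).map pvPiece).flatten := by
  induction cs with
  | nil => intro w; simp [pvSentA, pvGroups]
  | cons c rest ih =>
    intro w
    by_cases hc : PySem.Chars.isalpha c = true
    · rw [pvSentA]
      simp only [hc, List.takeWhile_cons, List.dropWhile_cons, if_pos]
      rw [ih (w ++ [c])]
      simp
    · rw [pvSentA]
      simp only [hc, if_false, Bool.false_eq_true]
      rw [List.takeWhile_cons, List.dropWhile_cons]
      simp only [hc, Bool.false_eq_true, if_false, List.append_nil]
      rw [pvN c (by simpa using hc) rest, ← pvP rest]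
      simp [ih [], pvAbWord]

theorem pvMain (cs : List Char) :
    ((pvSentA cs []).map pvAbWord).flatten = ((pvGroups cs).map pvPiece).flatten := by
  rw [pvL cs []]
  simpa using pvP cs

-- ===== VERDICT (by name: the statement is the Claim_ definition above) =====
theorem abbreviate_spec : Claim_equal_abbreviate := by
  intro s _
  unfold Spec_abbreviate abbreviate abbreviate_alt
  rw [pvMain]
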